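/- GENERATED by mk_final_copies.py from the proof of the farm's unit `vorbis_decode_packet_rest.1b` (farm:vorbis_decode_packet_rest.1b.1: Lemmas.lean) as the
   re-elaboration sweep compiled it — do not edit. -/
import Asan.CheckWalk
import Vorbis.Spec.Units.vorbis_decode_packet_rest_1b
import Vorbis.Spec.PacketRestFrame

/-
  UNIT vorbis_decode_packet_rest.1b — 0x110bda–0x110c3f of `vorbis_decode_packet_rest` (stb_vorbis_fixed.c 3217–3225): from the assertion
  `At1b` (after the poison stores of the prologue) to the head of the channel loop 0x1112d4 with `At2 … 0`.

      config_reads_kept_1b   what STABLE reads of `*f` is the same in two memories that keep `*f`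
      at2_of_stores          `At2 … 0` from `At1b` and the five stores of the segment, the stored values as NUMBERS (`n`, `n / 2`, `SB`)
      sar1_blocksize, lea_times56   the two closed bit-level facts (`sar ebp, 1` of a block size; the `lea` arithmetic of `56·mi`)
      at2_of_walk            `At2 … 0` from the WALKER's facts at 0x110c3f (its bit-vector values turned into the numbers)
      n_of_load              the dword loaded from `f->blocksize[blockflag]` is `n` (M2, HD3)
      seg1b_walk             the walk, split on `blockflag ∈ {0, 1}` (MD2) so that the address of the load is a literal offset; the four
                             check sites (`LiveIn.accSmall At1b.shadow (by v_untouched)`: all inside `*f`)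
-/

open X86 X86.User Asan Vorbis Vorbis.Spec Vorbis.Spec.vorbis_decode_packet_rest

set_option maxRecDepth 4000
set_option maxHeartbeats 4000000

namespace Vorbis.Spec.vorbis_decode_packet_rest_1b

/-- **What STABLE and the loop head read of `*f` survives when `*f` is kept**: the channel count, `n = blocksize[m->blockflag]`
and `map = &f->mapping[m->mapping]`, for the record `m` of a mode `mode < 64` (MD1). -/
theorem config_reads_kept_1b {mem mem' : Mem} {f m mode : Nat} (hk : (objBlock f).Kept mem mem')
    (hm : m = stb_vorbis.mode_config_at f mode) (hmode : mode < 64) :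
    stb_vorbis.channels mem' f = stb_vorbis.channels mem f ∧ nOf mem' f m = nOf mem f m ∧
      mapOf mem' f m = mapOf mem f m := by
  simp only [vacc, voff] at hm
  have e0 : stb_vorbis.blocksize_0 mem' f = stb_vorbis.blocksize_0 mem f :=
    hk.i32 (f + 152) (by simp only [vblock]; omega) (by simp only [vblock, voff]; omega)
  have e1 : stb_vorbis.blocksize_1 mem' f = stb_vorbis.blocksize_1 mem f :=
    hk.i32 (f + 156) (by simp only [vblock]; omega) (by simp only [vblock, voff]; omega)
  have e2 : Mode.blockflag mem' m = Mode.blockflag mem m :=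
    hk.u8 (m + 0) (by simp only [vblock]; omega) (by simp only [vblock, voff]; omega)
  have e3 : Mode.mapping mem' m = Mode.mapping mem m :=
    hk.u8 (m + 1) (by simp only [vblock]; omega) (by simp only [vblock, voff]; omega)
  have e4 : stb_vorbis.mapping mem' f = stb_vorbis.mapping mem f :=
    hk.ptr (f + 472) (by simp only [vblock]; omega) (by simp only [vblock, voff]; omega)
  refine ⟨?_, ?_, ?_⟩
  · exact hk.i32 (f + 4) (by simp only [vblock]; omega) (by simp only [vblock, voff]; omega)
  · unfold nOf
    rw [e2]
    exact bsize_congr e0 e1 _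
  · unfold mapOf stb_vorbis.mapping_at
    rw [e3, e4]

/-- **The exit assertion `At2 … 0` from the five stores of the segment.** The state `s` at 0x1112d4: its memory is the memory of
`At1b` with the two return addresses of the check calls (`[steady rsp − 8]`, twice), `n` (`[rsp + 0x50]`), `n >> 1` (`[rsp + 0x3c]`) and
`SB` (`[rsp + 0x60]`) stored; `r14 = 0`, `r13 = map`. All five stores lie in the function's own stack area, off the shadow and off
every allocated block: the invariant is carried from the ENTRY memory (`DecodeInv.carry`), the slots of `At1b` by `u_frame`. -/
theorem at2_of_stores (Lay : Layout) (hLay : Lay.hi = 0x1000000) {u₀ : State} {others : List Obj} {frames : List (Nat × FrameLayout)} {len : Nat} {Ar : Arena}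
    {stored room : Int} {mode : Nat} {ysz : Nat → Nat} {u : State} {ret : Word} {v s : State}
    (hat : At1b u₀ others frames len Ar stored room mode ysz u ret v) (x1 x2 : Nat)
    (w_mem : s.mem = ((((v.mem.writeLE (u.reg .rsp - 3008) 8 x1).writeLE (u.reg .rsp - 2920) 4
        (nOf u.mem (fOf u) (mOf u))).writeLE (u.reg .rsp - 3008) 8 x2).writeLE (u.reg .rsp - 2940) 4
        (nOf u.mem (fOf u) (mOf u) / 2)).writeLE (u.reg .rsp - 2904) 8 (sbOf u))
    (w_rip : s.rip = Vorbis.L.vorbis_decode_packet_rest.cut16) (w_rsp : s.reg .rsp = u.reg .rsp - 3000)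
    (w_r14 : s.reg .r14 = UInt64.ofNat 0) (w_r13 : (s.reg .r13).toNat = mapOf u.mem (fOf u) (mOf u))
    (w_eq : Vorbis.CodeOK u₀ s.mem) (habi : abiInv s) :
    At2 u₀ others frames len Ar stored room mode ysz u ret 0 s := by
  have he := hat.entry
  have he0 := he
  v_entry he
  have hpre0 := hat.pre
  obtain ⟨hsh, hinv, hargs⟩ := hat.pre
  have hsameP := hat.same
  have hinvP := hat.shadow
  -- the five stores: the function's own stack area, no shadow byte
  have hown : Mem.SameExcept [⟨(u.reg .rsp).toNat - 3856, (u.reg .rsp).toNat⟩] v.mem s.mem := by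
    u_same
  have hun : ShadowUntouched v.mem s.mem := by v_untouched
  have hsh' : ShadowInv others (framesIn frames u) (spOf u).toNat s.mem := hinvP.untouched hun
  -- since the entry: the stack area and its shadow
  have hsame2 : Mem.SameExcept [⟨(u.reg .rsp).toNat - 3856, (u.reg .rsp).toNat⟩,
      ⟨0xC00000 + ((u.reg .rsp).toNat - 3856) / 8, 0xC00000 + ((u.reg .rsp).toNat + 7) / 8⟩] u.mem s.mem := by
    refine hsameP.step_same hown ?_
    intro w hw a a1 a2
    have e1 : w = ⟨(u.reg .rsp).toNat - 3856, (u.reg .rsp).toNat⟩ := List.mem_singleton.mp hw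
    subst e1
    exact ⟨_, List.mem_cons_self, a1, a2⟩
  -- no allocated block meets the stack region or the shadow
  have hk : AllKept (RunBlk Ar len) u.mem s.mem := by
    apply AllKept.of_sameExcept hinv.ok hsame2
    intro B hB w hw
    have hoff := hinv.offStack B hB
    have hins := hinv.ok.inside B hB
    simp only [List.mem_cons, List.mem_nil_iff, or_false] at hw
    rcases hw with rfl | rfl
    · simp only
      omega
    · simp only
      omega
  have hinv' : DecodeInv others (framesIn frames u) len Ar stored room ysz s.mem (fOf u) :=
    hinv.carry hsh.inv hk hsh'
  -- what STABLE reads of `*f`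
  have hmode : mode < 64 := by
    have := hinv.fb.vorbis.mode.MD1.2
    have := hargs.mode_lt
    omega
  obtain ⟨ech, en, emap⟩ := config_reads_kept_1b (hk _ hinv.ob1) hargs.m_eq hmode
  -- the function's footprint so far
  have hsame : Mem.SameExcept ((vorbis_decode_packet_rest.spec others frames len Ar stored room mode ysz).footprint u)
      u.mem s.mem := by
    refine hsame2.mono ?_
    intro w hw a a1 a2
    simp only [List.mem_cons, List.mem_nil_iff, or_false] at hw
    rcases hw with rfl | rfl
    · exact covered_footprint others frames len Ar stored room mode ysz u a (Or.inl ⟨a1, a2⟩)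
    · refine covered_footprint others frames len Ar stored room mode ysz u a ?_
      right; right; right; right; right; right; right; left
      exact ⟨a1, a2⟩
  -- the return address and the six saved registers
  have t0 : UInt64.ofNat (s.mem.readLE (u.reg .rsp) 8) = ret := by u_frame hat.ra
  have t1 : UInt64.ofNat (s.mem.readLE (u.reg .rsp - 8) 8) = u.reg .r15 := by u_frame hat.s_r15
  have t2 : UInt64.ofNat (s.mem.readLE (u.reg .rsp - 16) 8) = u.reg .r14 := by u_frame hat.s_r14
  have t3 : UInt64.ofNat (s.mem.readLE (u.reg .rsp - 24) 8) = u.reg .r13 := by u_frame hat.s_r13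
  have t4 : UInt64.ofNat (s.mem.readLE (u.reg .rsp - 32) 8) = u.reg .r12 := by u_frame hat.s_r12
  have t5 : UInt64.ofNat (s.mem.readLE (u.reg .rsp - 40) 8) = u.reg .rbp := by u_frame hat.s_rbp
  have t6 : UInt64.ofNat (s.mem.readLE (u.reg .rsp - 48) 8) = u.reg .rbx := by u_frame hat.s_rbx
  -- the slots of STABLE are spelled `steady rsp + off`: the same words as the walker's `entry rsp − k`
  have a40 : spOf u + 0x40 = u.reg .rsp - 2936 := by
    apply UInt64.toNat_inj.mp
    u_omega
  have a68 : spOf u + 0x68 = u.reg .rsp - 2896 := by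
    apply UInt64.toNat_inj.mp
    u_omega
  have a70 : spOf u + 0x70 = u.reg .rsp - 2888 := by
    apply UInt64.toNat_inj.mp
    u_omega
  have a78 : spOf u + 0x78 = u.reg .rsp - 2880 := by
    apply UInt64.toNat_inj.mp
    u_omega
  have a7c : spOf u + 0x7c = u.reg .rsp - 2876 := by
    apply UInt64.toNat_inj.mp
    u_omega
  have a50 : spOf u + 0x50 = u.reg .rsp - 2920 := by
    apply UInt64.toNat_inj.mp
    u_omega
  have a3c : spOf u + 0x3c = u.reg .rsp - 2940 := by
    apply UInt64.toNat_inj.mp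
    u_omega
  have a60 : spOf u + 0x60 = u.reg .rsp - 2904 := by
    apply UInt64.toNat_inj.mp
    u_omega
  -- the five spill slots of the prologue
  have q1 : s.mem.readLE (u.reg .rsp - 2936) 8 = (u.reg .rdi).toNat := by u_frame hat.slot_f
  have q2 : s.mem.readLE (u.reg .rsp - 2896) 8 = (u.reg .rsi).toNat := by u_frame hat.slot_len
  have q3 : s.mem.readLE (u.reg .rsp - 2888) 8 = (u.reg .rdx).toNat := by u_frame hat.slot_m
  have q4 : s.mem.readLE (u.reg .rsp - 2880) 4 = (Word.part .w32 (u.reg .rcx)).toNat := by u_frame hat.slot_ls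
  have q5 : s.mem.readLE (u.reg .rsp - 2876) 4 = (Word.part .w32 (u.reg .r9)).toNat := by u_frame hat.slot_rs
  -- `n` is a legal block size: at most 8192
  have hnfacts := ((HD3.toMdct hinv.config.header.HD3).size (Mode.blockflag u.mem (mOf u))).facts
  have hnle : nOf u.mem (fOf u) (mOf u) ≤ 8192 := hnfacts.2.2
  -- the three slots the segment stores: `n`, `n >> 1`, `SB`
  have q6 : s.mem.readLE (u.reg .rsp - 2920) 4 = nOf u.mem (fOf u) (mOf u) := by
    rw [w_mem]
    u_read
  have q7 : s.mem.readLE (u.reg .rsp - 2940) 4 = nOf u.mem (fOf u) (mOf u) / 2 := by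
    rw [w_mem]
    u_read
  have hsb : sbOf u < 2 ^ 32 := by
    unfold sbOf
    omega
  have q8 : s.mem.readLE (u.reg .rsp - 2904) 8 = sbOf u := by
    rw [w_mem]
    u_read
  -- the two stack arguments (above the entry rsp) and `*p_left` (an object of a caller's frame)
  have q9 : s.mem.readLE (u.reg .rsp + 8) 4 = u.mem.readLE (u.reg .rsp + 8) 4 := by
    u_frame (rfl : u.mem.readLE (u.reg .rsp + 8) 4 = _)
  have q10 : s.mem.readLE (u.reg .rsp + 16) 8 = u.mem.readLE (u.reg .rsp + 16) 8 := by
    u_frame (rfl : u.mem.readLE (u.reg .rsp + 16) 8 = _)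
  have hleft : s.mem.i32 (pLeftOf u) = u.mem.i32 (pLeftOf u) := by
    obtain ⟨hl, hl1, hl2⟩ := hargs.left_obj
    have hw := hl.where_ hsh.inv hsh.offText (by omega)
    have ea : (addr (pLeftOf u)).toNat = pLeftOf u := toNat_addr _ (by omega)
    unfold Mem.i32 Mem.u32
    rw [hsame2.readLE (addr (pLeftOf u)) 4 (by omega) ?_]
    intro w hw'
    simp only [List.mem_cons, List.mem_nil_iff, or_false] at hw'
    rcases hw' with rfl | rfl
    · simp only
      omega
    · simp only
      omega
  -- STABLE in its own spelling
  have g1 : slot64 u s 0x40 = fOf u := by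
    show s.mem.readLE (spOf u + 0x40) 8 = _
    rw [a40]
    exact q1
  have g2 : slot64 u s 0x68 = lenOf u := by
    show s.mem.readLE (spOf u + 0x68) 8 = _
    rw [a68]
    exact q2
  have g3 : slot64 u s 0x70 = mOf u := by
    show s.mem.readLE (spOf u + 0x70) 8 = _
    rw [a70]
    exact q3
  have g4 : sint32 (slot32 u s 0x78) = lsOf u := by
    show sint32 (s.mem.readLE (spOf u + 0x78) 4) = _
    rw [a78, q4, Vorbis.toNat_part32]
    exact (Vorbis.Spec.part32_toInt _).symm
  have g5 : sint32 (slot32 u s 0x7c) = rsOf u := by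
    show sint32 (s.mem.readLE (spOf u + 0x7c) 4) = _
    rw [a7c, q5, Vorbis.toNat_part32]
    exact (Vorbis.Spec.part32_toInt _).symm
  have g6 : slot32 u s 0x50 = nOf s.mem (fOf u) (mOf u) := by
    show s.mem.readLE (spOf u + 0x50) 4 = _
    rw [a50, q6, en]
  have g7 : slot32 u s 0x3c = nOf s.mem (fOf u) (mOf u) / 2 := by
    show s.mem.readLE (spOf u + 0x3c) 4 = _
    rw [a3c, q7, en]
  have g8 : slot64 u s 0x60 = sbOf u := by
    show s.mem.readLE (spOf u + 0x60) 8 = _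
    rw [a60]
    exact q8
  have g9 : sint32 (s.mem.readLE (u.reg .rsp + 8) 4) = reOf u := by
    rw [q9]
    rfl
  have g10 : s.mem.readLE (u.reg .rsp + 16) 8 = pLeftOf u := by
    rw [q10]
    rfl
  have g11 : s.mem.i32 (pLeftOf u) = lsOf u := by
    rw [hleft]
    exact hargs.left_val
  -- the head of the channel loop: `i = 0 ≤ channels` (HD1), `r13 = map`
  have hch : (0 : Int) ≤ stb_vorbis.channels s.mem (fOf u) := by
    have := hinv.config.header.HD1.1
    rw [ech]
    omega
  have hr13 : (s.reg .r13).toNat = mapOf s.mem (fOf u) (mOf u) := by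
    rw [emap]
    exact w_r13
  exact ⟨⟨⟨he0, hpre0, w_rsp, w_eq, habi, hsame, t0, t1, t2, t3, t4, t5, t6, hsh', hinv'⟩,
    g1, g2, g3, g4, g5, g6, g7, g8, g9, g10, g11⟩, w_rip, w_r14, hch, hr13⟩

/-- The low dword of a legal block size `n` (`mov ebp, [f->blocksize + 4·b]`) is `n`, and `sar ebp, 1` of it is `n / 2`: a closed
fact about the eight sizes. -/
theorem sar1_blocksize (n : Nat) (hn : Mdct.IsBlocksize n) :
    (BitVec.ofNat 32 n).toNat = n ∧ ((BitVec.ofNat 32 n).sshiftRight 1).toNat = n / 2 := by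
  rcases hn.cases with rfl | rfl | rfl | rfl | rfl | rfl | rfl | rfl
  all_goals
    constructor
    · decide
    · decide

/-- `lea rax, [rdx*8]; sub rax, rdx; lea r15, [rbx + rax*8]` of a zero-extended byte `mi`: `56 · mi` (the stride of `Mapping`). A
closed fact, checked for the 256 values. -/
theorem lea_times56 (mi : Nat) (hmi : mi < 256) :
    (Word.ofBV (BitVec.zeroExtend 32 (BitVec.ofNat 8 mi)) * 8
      - Word.ofBV (BitVec.setWidth 64 (BitVec.zeroExtend 32 (BitVec.ofNat 8 mi)))) * 8 = UInt64.ofNat (56 * mi) := by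
  have h : ∀ j : Fin 256, (Word.ofBV (BitVec.zeroExtend 32 (BitVec.ofNat 8 j.val)) * 8
      - Word.ofBV (BitVec.setWidth 64 (BitVec.zeroExtend 32 (BitVec.ofNat 8 j.val)))) * 8 = UInt64.ofNat (56 * j.val) := by
    decide
  exact h ⟨mi, hmi⟩

/-- **The exit assertion from the walker's facts at 0x110c3f**, the same on both arms of `blockflag`: `nraw` is the dword loaded from
`f->blocksize[blockflag]` (`hn`: it is `n`, M2), `mi` the byte `m->mapping`, `map0` the pointer `f->mapping`. The walker's values
— `(BitVec.ofNat 32 nraw).toNat`, its `sshiftRight 1`, `(rsp − 2872) >>> 3`, the `lea` arithmetic of `map0 + 56·mi` — are turned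
into the numbers `at2_of_stores` speaks about. -/
theorem at2_of_walk (Lay : Layout) (hLay : Lay.hi = 0x1000000) {u₀ : State} {others : List Obj}
    {frames : List (Nat × FrameLayout)} {len : Nat} {Ar : Arena}
    {stored room : Int} {mode : Nat} {ysz : Nat → Nat} {u : State} {ret : Word} {v s : State}
    (hat : At1b u₀ others frames len Ar stored room mode ysz u ret v) (nraw mi map0 x1 x2 : Nat)
    (hn : nraw = nOf u.mem (fOf u) (mOf u))
    (hmi : u.mem.readLE (u.reg .rdx + 1) 1 = mi) (hmap0 : u.mem.readLE (u.reg .rdi + 472) 8 = map0)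
    (w_mem : s.mem = ((((v.mem.writeLE (u.reg .rsp - 3008) 8 x1).writeLE (u.reg .rsp - 2920) 4
        (BitVec.ofNat 32 nraw).toNat).writeLE (u.reg .rsp - 3008) 8 x2).writeLE (u.reg .rsp - 2940) 4
        ((BitVec.ofNat 32 nraw).sshiftRight 1).toNat).writeLE (u.reg .rsp - 2904) 8 (UInt64.toNat ((u.reg .rsp - 2872) >>> 3)))
    (w_rip : s.rip = Vorbis.L.vorbis_decode_packet_rest.cut16) (w_rsp : s.reg .rsp = u.reg .rsp - 3000)
    (w_r13 : s.reg .r13 = UInt64.ofNat map0 + (Word.ofBV (BitVec.zeroExtend 32 (BitVec.ofNat 8 mi)) * 8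
      - Word.ofBV (BitVec.setWidth 64 (BitVec.zeroExtend 32 (BitVec.ofNat 8 mi)))) * 8)
    (w_r14 : s.reg .r14 = Word.ofBV 0#32)
    (w_eq : Vorbis.CodeOK u₀ s.mem) (habi : abiInv s) :
    At2 u₀ others frames len Ar stored room mode ysz u ret 0 s := by
  have he := hat.entry
  v_entry he
  obtain ⟨hsh, hinv, hargs⟩ := hat.pre
  -- `n` is a legal block size
  have hnsize : Mdct.IsBlocksize (nOf u.mem (fOf u) (mOf u)) :=
    (HD3.toMdct hinv.config.header.HD3).size (Mode.blockflag u.mem (mOf u))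
  obtain ⟨en1, en2⟩ := sar1_blocksize _ hnsize
  -- `SB`
  have esb : UInt64.toNat ((u.reg .rsp - 2872) >>> 3) = sbOf u := by
    unfold sbOf
    u_omega
  rw [hn, en1, en2, esb] at w_mem
  -- `m->mapping` is a byte
  have hmi256 : mi < 256 := by
    rw [← hmi]
    exact X86.User.Mem.readLE_lt' u.mem _ 1
  -- the mapping block is allocated (MP1): `f->mapping` lies in the data space
  have hmapblk := hinv.ok.inside _ hinv.config.mapping.MP1_block
  simp only [] at hmapblk
  -- where `*f` and the mode record are
  have hwf := hinv.objLive.where_ hsh.inv hsh.offText (by simp only [Vorbis.Off.sizeof.stb_vorbis]; omega)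
  simp only [Vorbis.Off.sizeof.stb_vorbis] at hwf
  have hf_hi : (u.reg .rdi).toNat + 1808 ≤ 12582912 := hwf.2.1
  have hmlt := hargs.mode_lt
  have hmd1 := hinv.config.mode.MD1
  have hmeq : (u.reg .rdx).toNat = (u.reg .rdi).toNat + 484 + 6 * mode := by
    have e := hargs.m_eq
    simp only [vacc, voff] at e
    exact e
  have e1 : u.mem.u64 (fOf u + 472) = map0 := by
    rw [← hmap0]
    show u.mem.readLE (addr ((u.reg .rdi).toNat + 472)) 8 = u.mem.readLE (u.reg .rdi + 472) 8
    congr 1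
  have e2 : u.mem.u8 (mOf u + 1) = mi := by
    rw [← hmi]
    show u.mem.readLE (addr ((u.reg .rdx).toNat + 1)) 1 = u.mem.readLE (u.reg .rdx + 1) 1
    congr 1
  have hr13 : (s.reg .r13).toNat = mapOf u.mem (fOf u) (mOf u) := by
    rw [w_r13, lea_times56 mi hmi256]
    unfold mapOf
    simp only [vacc, voff]
    rw [e1, e2]
    simp only [vacc, voff] at hmapblk
    rw [e1] at hmapblk
    simp only [UInt64.toNat_add, UInt64.toNat_ofNat']
    omega
  exact at2_of_stores Lay hLay hat x1 x2 w_mem w_rip w_rsp w_r14 hr13 w_eq habi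


/-- **The dword loaded from `f->blocksize[blockflag]` is `n`** (M2: `blocksize[b] = bsize b` for `b < 2`; HD3: a legal block size,
so the signed reading is the unsigned one). -/
theorem n_of_load {others : List Obj} {frames : List (Nat × FrameLayout)} {len : Nat} {Ar : Arena}
    {stored room : Int} {ysz : Nat → Nat} {u : State}
    (hinv : DecodeInv others frames len Ar stored room ysz u.mem (fOf u)) (b : Nat) (hb : b < 2)
    (hbf : Mode.blockflag u.mem (mOf u) = b) (nraw : Nat)
    (hnraw : u.mem.readLE (addr (fOf u + 144 + 4 * b)) 4 = nraw) : nraw = nOf u.mem (fOf u) (mOf u) := by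
  have m2 := hinv.config.mdct.M2 b hb
  simp only [vacc, voff] at m2
  rw [X86.User.Mem.i32_def] at m2
  unfold X86.User.Mem.u32 at m2
  rw [hnraw] at m2
  have hc := sint32_cases nraw
  have hlt : nraw < 4294967296 := by
    have h := X86.User.Mem.readLE_lt' u.mem (addr (fOf u + 144 + 4 * b)) 4
    rw [hnraw] at h
    exact h
  have hsz := ((HD3.toMdct hinv.config.header.HD3).size b).facts
  unfold nOf
  rw [hbf]
  omega

/-- **Segment .1b, 0x110bda–0x110c3f → 0x1112d4** (lines 3217–3225), from the assertion
`At1b` at 0x110bda the machine reaches the head of the channel loop (`cut16`) with `At2 … 0`, every state on the way is in `WayInv`, and the four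
check sites pass (0x110bdd load1 `m + 0`, 0x110bee load4 `f + 0x90 + 4·blockflag`, 0x110c02 load8 `f + 0x1d8`, 0x110c12 load1
`m + 1`: all inside `*f`, which is live also with the function's own frame in front; the shadow layer is `At1b.shadow`, and no
store after 0x110bda goes to the shadow). `blockflag ∈ {0, 1}` (MD2) is split before the walk so that the address of
`f->blocksize[blockflag]` is a literal offset. The exit assertion is `at2_of_walk`. -/
theorem seg1b_walk (Lay : Layout) (hLay : Lay.hi = 0x1000000) (μ : Microarch) (hμ : UserX.MicroOK μ) (u₀ : State)
    (hcode : HasCodeNat Lay u₀ Vorbis.L.vorbis_decode_packet_rest.entry Vorbis.Code.code_vorbis_decode_packet_rest.nat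
      Vorbis.L.vorbis_decode_packet_rest.size)
    (hld1 : Asan.SmallCheck Lay μ Vorbis.WayInv (Vorbis.CodeOK u₀) [.rax, .rdx] 1 Vorbis.L.__asan_load1_noabort.entry)
    (hld4 : Asan.SmallCheck Lay μ Vorbis.WayInv (Vorbis.CodeOK u₀) [.rax, .rcx, .rdx] 4 Vorbis.L.__asan_load4_noabort.entry)
    (hld8 : Asan.SmallCheck Lay μ Vorbis.WayInv (Vorbis.CodeOK u₀) [.rax, .rcx, .rdx] 8 Vorbis.L.__asan_load8_noabort.entry)
    (others : List Obj) (frames : List (Nat × FrameLayout)) (len : Nat) (Ar : Arena) (stored room : Int)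
    (mode : Nat) (ysz : Nat → Nat) (u : State) (ret : Word) (v : State)
    (hat : At1b u₀ others frames len Ar stored room mode ysz u ret v) :
    ReachVia Lay μ Vorbis.WayInv v (fun w => At2 u₀ others frames len Ar stored room mode ysz u ret 0 w) := by
  have he := hat.entry
  have he0 := he
  v_entry he
  have hpre0 := hat.pre
  obtain ⟨hsh, hinv, hargs⟩ := hat.pre
  have w_rip := hat.rip
  have w_rsp := hat.rsp
  have w_r13 := hat.r13
  have w_r14 := hat.r14
  have w_r15 := hat.r15
  have w_rdx := hat.rdx
  have w_eq := hat.code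
  have hdf := hat.df
  have hmx := hat.mx
  have hsse : SseOK v := Vorbis.sseOK_of_abiInv (Vorbis.abiInv_of hdf hmx)
  have hsameP := hat.same
  have hinvP := hat.shadow
  -- where `*f` and the mode record are
  have hwf := hinv.objLive.where_ hsh.inv hsh.offText (by simp only [Vorbis.Off.sizeof.stb_vorbis]; omega)
  simp only [Vorbis.Off.sizeof.stb_vorbis] at hwf
  obtain ⟨hf_lo, hf_hi, _⟩ := hwf
  have hf_off := hinv.objOff
  simp only [Vorbis.Off.sizeof.stb_vorbis] at hf_off
  have hmode := hinv.config.mode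
  have hmd1 := hmode.MD1
  have hmlt := hargs.mode_lt
  have hmeq := hargs.m_eq
  simp only [vacc, voff] at hmeq
  have hm : (u.reg .rdx).toNat = (u.reg .rdi).toNat + 484 + 6 * mode := hmeq
  have hmode64 : mode < 64 := by omega
  have hf_lo' : 1154368 ≤ (u.reg .rdi).toNat := hf_lo
  have hf_hi' : (u.reg .rdi).toNat + 1808 ≤ 12582912 := hf_hi
  have hf_off' : (u.reg .rdi).toNat + 1808 ≤ 7340032 ∨ 8388608 ≤ (u.reg .rdi).toNat := hf_off
  have hbfle := hmode.blockflag_le hmlt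
  rw [← hargs.m_eq] at hbfle
  have w_kept : RegsKept [.rsp, .r13, .r14, .r15, .rdx] v v := RegsKept.refl _ _
  clear hmeq hmd1 hmlt hf_lo hf_hi hf_off
  -- `*f` is live, also with the function's own frame in front
  have hlive : LiveIn others (framesIn frames u) (u.reg .rdi).toNat 1808 :=
    hinv.objLive.mono (framesIn_sub others frames u)
  -- the four loads of the segment, as facts about the memory at 0x110bda
  obtain ⟨b, hb⟩ : ∃ b : Nat, u.mem.readLE (u.reg .rdx) 1 = b := ⟨_, rfl⟩
  have hbv : v.mem.readLE (u.reg .rdx) 1 = b := by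
    u_frame hb
  obtain ⟨mi, hmi⟩ : ∃ mi : Nat, u.mem.readLE (u.reg .rdx + 1) 1 = mi := ⟨_, rfl⟩
  have hmiv : v.mem.readLE (u.reg .rdx + 1) 1 = mi := by
    u_frame hmi
  obtain ⟨map0, hmap0⟩ : ∃ map0 : Nat, u.mem.readLE (u.reg .rdi + 472) 8 = map0 := ⟨_, rfl⟩
  have hmap0v : v.mem.readLE (u.reg .rdi + 472) 8 = map0 := by
    u_frame hmap0
  have hbf : Mode.blockflag u.mem (mOf u) = b := by
    rw [← hb]
    simp only [vacc, voff, Nat.add_zero, Mem.u8, addr_toNat]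
  have hb01 : b = 0 ∨ b = 1 := by
    omega
  rcases hb01 with rfl | rfl
  · -- blockflag = 0
    obtain ⟨nraw, hnraw⟩ : ∃ nraw : Nat, u.mem.readLE (u.reg .rdi + 144) 4 = nraw := ⟨_, rfl⟩
    have hnrawv : v.mem.readLE (u.reg .rdi + 144) 4 = nraw := by
      u_frame hnraw
    have hn : nraw = nOf u.mem (fOf u) (mOf u) := by
      apply n_of_load hinv 0 (by omega) hbf nraw
      rw [← hnraw]
      show u.mem.readLE (addr ((u.reg .rdi).toNat + 144 + 4 * 0)) 4 = u.mem.readLE (u.reg .rdi + 144) 4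
      congr 1
    u_walk hcode [hμ.vendor] until [Vorbis.L.vorbis_decode_packet_rest.cut16] span [Vorbis.L.textLo, Vorbis.L.textHi] side (v_side)
    · -- 0x110bdd: load1 m + 0 (line 3217), inside `*f` (MD1)
      have hun : ShadowUntouched v.mem s_110bdd.mem := by v_untouched
      exact hlive.accSmall hinvP hun _ 1 (by decide) (by u_omega) (by u_omega)
    · -- 0x110bee: load4 f + 0x90 + 4·blockflag (line 3217), inside `*f` (MD2: blockflag ≤ 1)
      have hun : ShadowUntouched v.mem s_110bee.mem := by v_untouched
      exact hlive.accSmall hinvP hun _ 4 (by decide) (by u_omega) (by u_omega)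
    · -- 0x110c02: load8 f + 0x1d8 (line 3218), inside `*f`
      have hun : ShadowUntouched v.mem s_110c02.mem := by v_untouched
      exact hlive.accSmall hinvP hun _ 8 (by decide) (by u_omega) (by u_omega)
    · -- 0x110c12: load1 m + 1 (line 3218), inside `*f` (MD1)
      have hun : ShadowUntouched v.mem s_110c12.mem := by v_untouched
      exact hlive.accSmall hinvP hun _ 1 (by decide) (by u_omega) (by u_omega)
    · -- 0x110c3f → 0x1112d4
      have habi : abiInv s_110c3f := by v_inv
      exact ReachVia.done (at2_of_walk Lay hLay hat nraw mi map0 _ _ hn hmi hmap0 w_mem w_rip w_rsp w_r13 w_r14 w_eq habi)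
  · -- blockflag = 1
    obtain ⟨nraw, hnraw⟩ : ∃ nraw : Nat, u.mem.readLE (u.reg .rdi + 148) 4 = nraw := ⟨_, rfl⟩
    have hnrawv : v.mem.readLE (u.reg .rdi + 148) 4 = nraw := by
      u_frame hnraw
    have hn : nraw = nOf u.mem (fOf u) (mOf u) := by
      apply n_of_load hinv 1 (by omega) hbf nraw
      rw [← hnraw]
      show u.mem.readLE (addr ((u.reg .rdi).toNat + 144 + 4 * 1)) 4 = u.mem.readLE (u.reg .rdi + 148) 4
      congr 1
    u_walk hcode [hμ.vendor] until [Vorbis.L.vorbis_decode_packet_rest.cut16] span [Vorbis.L.textLo, Vorbis.L.textHi] side (v_side)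
    · -- 0x110bdd: load1 m + 0 (line 3217), inside `*f` (MD1)
      have hun : ShadowUntouched v.mem s_110bdd.mem := by v_untouched
      exact hlive.accSmall hinvP hun _ 1 (by decide) (by u_omega) (by u_omega)
    · -- 0x110bee: load4 f + 0x90 + 4·blockflag (line 3217), inside `*f` (MD2: blockflag ≤ 1)
      have hun : ShadowUntouched v.mem s_110bee.mem := by v_untouched
      exact hlive.accSmall hinvP hun _ 4 (by decide) (by u_omega) (by u_omega)
    · -- 0x110c02: load8 f + 0x1d8 (line 3218), inside `*f`
      have hun : ShadowUntouched v.mem s_110c02.mem := by v_untouched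
      exact hlive.accSmall hinvP hun _ 8 (by decide) (by u_omega) (by u_omega)
    · -- 0x110c12: load1 m + 1 (line 3218), inside `*f` (MD1)
      have hun : ShadowUntouched v.mem s_110c12.mem := by v_untouched
      exact hlive.accSmall hinvP hun _ 1 (by decide) (by u_omega) (by u_omega)
    · -- 0x110c3f → 0x1112d4
      have habi : abiInv s_110c3f := by v_inv
      exact ReachVia.done (at2_of_walk Lay hLay hat nraw mi map0 _ _ hn hmi hmap0 w_mem w_rip w_rsp w_r13 w_r14 w_eq habi)

end Vorbis.Spec.vorbis_decode_packet_rest_1b
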